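-- pv_equiv track=rewrite | github.com/hrutiknaik/IP-LP3-SUBMISSION-SAMPLE | IP_LP3_PYTHON_HRUTIK_NAIK_2168/Question6(1).py | countSpecialElements
-- ===== SOURCE A (Python) =====
-- def countSpecialElements(a):
--   nRows= len(a)
--   nCount=0
--
--   for row in a:
--     for indexCol, element in enumerate(row):
--
--       if element==min(row) or element==max(row):
--         if row.count(element)>1:
--           return -1
--         nCount=nCount+1
--
--       else:
--         listColumn=[]
--
--         for indexRow in range(0, nRows):
--           listColumn.append(a[indexRow][indexCol])
--
--         if element==min(listColumn) or element==max(listColumn):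
--           if listColumn.count(element)>1:
--             return -1
--           nCount=nCount+1
--
--   return nCount
-- ===== SOURCE B (Python) =====
-- def countSpecialElements(a):
--     # Precompute per-column stats once (zip truncates; fine for rectangular input)
--     # and per-row stats once per row, instead of rescanning rows/columns per element.
--     col_stats = []
--     for c in zip(*a):
--         cnt = {}
--         for x in c:
--             cnt[x] = cnt.get(x, 0) + 1
--         col_stats.append((min(c), max(c), cnt))
--     n = 0
--     for r in a:
--         if not r:
--             continue
--         rmin = min(r)
--         rmax = max(r)
--         rcnt = {}
--         for x in r:
--             rcnt[x] = rcnt.get(x, 0) + 1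
--         for j, e in enumerate(r):
--             if e == rmin or e == rmax:
--                 if rcnt[e] > 1:
--                     return -1
--                 n += 1
--             else:
--                 cmin, cmax, ccnt = col_stats[j]
--                 if e == cmin or e == cmax:
--                     if ccnt[e] > 1:
--                         return -1
--                     n += 1
--     return n
-- ===== Notes on version B (the rewrite author's own statement) =====
-- stated objective: alternative
-- what changed: Per-row min/max/value-count and per-column min/max/value-count are precomputed once (columns via zip, counts via a dict), so the per-element inner scans (min/max/count of the row and a rebuilt column) disappear; one pass then classifies each element (no measured speed-up: the timing family exits early with -1).
-- outside the precondition, e.g. on countSpecialElements([[1, 1], [1, 2, 3, 4]]): A returns -1, B returns -1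
import Mathlib
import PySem

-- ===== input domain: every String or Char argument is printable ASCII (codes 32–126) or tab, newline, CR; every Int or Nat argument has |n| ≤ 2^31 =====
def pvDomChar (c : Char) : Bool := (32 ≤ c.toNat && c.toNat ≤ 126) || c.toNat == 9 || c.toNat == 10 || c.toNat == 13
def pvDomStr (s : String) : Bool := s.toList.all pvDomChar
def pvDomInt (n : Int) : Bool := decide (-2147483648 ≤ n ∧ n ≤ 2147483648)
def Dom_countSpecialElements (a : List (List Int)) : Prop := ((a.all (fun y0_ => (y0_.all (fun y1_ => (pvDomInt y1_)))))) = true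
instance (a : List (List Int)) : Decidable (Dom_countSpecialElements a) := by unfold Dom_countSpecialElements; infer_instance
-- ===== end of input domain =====

-- B precomputes per-row and per-column min/max/value-counts once, replacing A's
-- per-element rescans of its row and rebuilt columns (alternative structure; no speed
-- claim); equivalence is proved on every input admitted by Pre_.

-- ===== PORT A =====
-- listColumn built by 'for indexRow in range(0, nRows): listColumn.append(a[indexRow][indexCol])'
def pvColA (a : List (List Int)) (j : Int) : List Int :=
  (PySem.List.pyRange 0 (a.length : Int) 1).foldl
    (fun col i => col ++ [PySem.List.pyGetD (PySem.List.pyGetD a i []) j 0]) []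

-- the body of A's inner loop for one element: none = 'return -1', some k = 'nCount += k'
def pvElemA (a : List (List Int)) (row : List Int) (j : Int) (e : Int) : Option Int :=
  if e = (PySem.List.min? row (fun x => x)).getD 0 ∨ e = (PySem.List.max? row (fun x => x)).getD 0 then
    if 1 < PySem.List.count row e then none else some 1
  else
    let c := pvColA a j
    if e = (PySem.List.min? c (fun x => x)).getD 0 ∨ e = (PySem.List.max? c (fun x => x)).getD 0 then
      if 1 < PySem.List.count c e then none else some 1
    else some 0

def countSpecialElements (a : List (List Int)) : Int :=
  (a.foldl (fun acc row =>
      (PySem.List.enumerate row 0).foldl (fun acc2 je =>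
        acc2.bind fun n => (pvElemA a row je.1 je.2).map (fun k => n + k)) acc)
    (some 0)).getD (-1)

-- ===== PORT B =====
-- 'cnt = {}; for x in xs: cnt[x] = cnt.get(x, 0) + 1'
def pvCounter (xs : List Int) : PySem.Dict Int Int :=
  xs.foldl (fun d x => d.insert x (d.getD x 0 + 1)) PySem.Dict.empty

-- zip(*a): columns, truncated to the shortest row
def pvZipCols (a : List (List Int)) : List (List Int) :=
  match a with
  | [] => []
  | r0 :: _ =>
    (List.range (a.foldl (fun m r => min m r.length) r0.length)).map
      (fun j => a.map (fun r => r.getD j 0))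

def pvColStats (a : List (List Int)) : List (Int × Int × PySem.Dict Int Int) :=
  (pvZipCols a).map (fun c =>
    ((PySem.List.min? c (fun x => x)).getD 0, (PySem.List.max? c (fun x => x)).getD 0, pvCounter c))

def pvElemB (cols : List (Int × Int × PySem.Dict Int Int))
    (rmin rmax : Int) (rcnt : PySem.Dict Int Int) (j : Int) (e : Int) : Option Int :=
  if e = rmin ∨ e = rmax then
    if 1 < rcnt.getD e 0 then none else some 1
  else
    let cs := PySem.List.pyGetD cols j (0, 0, PySem.Dict.empty)
    if e = cs.1 ∨ e = cs.2.1 then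
      if 1 < cs.2.2.getD e 0 then none else some 1
    else some 0

def countSpecialElements_alt (a : List (List Int)) : Int :=
  let colStats := pvColStats a
  (a.foldl (fun acc r =>
      if r = [] then acc
      else
        let rmin := (PySem.List.min? r (fun x => x)).getD 0
        let rmax := (PySem.List.max? r (fun x => x)).getD 0
        let rcnt := pvCounter r
        (PySem.List.enumerate r 0).foldl (fun acc2 je =>
          acc2.bind fun n => (pvElemB colStats rmin rmax rcnt je.1 je.2).map (fun k => n + k)) acc)
    (some 0)).getD (-1)

-- ===== PRECONDITION & SPEC =====
-- A builds the column at index k only for an element strictly between its row's min and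
-- max; if some row has length ≤ k there, A raises IndexError. Pre_ excludes exactly such
-- shapes: whenever a[i][k] is neither the min nor the max of its row, every row must be
-- longer than k. (On the few excluded ragged inputs where A still returns — e.g. a -1
-- from a duplicate found before the short column is reached — B returns the same value.)
def Pre_countSpecialElements (a : List (List Int)) : Prop :=
  ∀ r ∈ a, ∀ k < r.length,
    ((∃ y ∈ r, y < r.getD k 0) ∧ (∃ y ∈ r, r.getD k 0 < y)) →
      ∀ r' ∈ a, k < r'.length

instance (a : List (List Int)) : Decidable (Pre_countSpecialElements a) := by
  unfold Pre_countSpecialElements; infer_instance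

def pvWitness_countSpecialElements : List (List Int) := [[1, 2], [4, 3]]

def Spec_countSpecialElements (a : List (List Int)) (out : Int) : Prop := out = countSpecialElements_alt a
instance (a : List (List Int)) (out : Int) : Decidable (Spec_countSpecialElements a out) := by unfold Spec_countSpecialElements; infer_instance

-- ===== CLAIM (what is proved, stated in full; the proofs are below) =====
def Claim_equal_countSpecialElements : Prop := ∀ (a : List (List Int)), Dom_countSpecialElements a → Pre_countSpecialElements a → Spec_countSpecialElements a (countSpecialElements a)

-- ===== LEMMAS AND PROOFS =====

theorem pv_colA_eq_map (a : List (List Int)) (k : Nat) :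
    pvColA a (k : Int) = a.map (fun r => r.getD k 0) := by
  unfold pvColA
  rw [PySem.List.foldl_append_singleton_eq_map
        (fun i => PySem.List.pyGetD (PySem.List.pyGetD a i []) (k : Int) 0)]
  have hc : (fun i => PySem.List.pyGetD (PySem.List.pyGetD a i []) (k : Int) 0)
      = (fun r => PySem.List.pyGetD r (k : Int) 0) ∘ (fun i => PySem.List.pyGetD a i []) := rfl
  have hlen : (a.length : Int) = PySem.List.len a := by simp
  rw [List.nil_append, hc, ← List.map_map, hlen, PySem.List.map_pyGetD_pyRange_zero]
  simp [PySem.List.pyGetD_natCast]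

theorem pv_lt_foldl_min (k : Nat) (l : List (List Int)) (init : Nat) (h0 : k < init)
    (h : ∀ r ∈ l, k < r.length) : k < l.foldl (fun m r => min m r.length) init := by
  induction l generalizing init with
  | nil => exact h0
  | cons x t ih =>
    exact ih _ (lt_min h0 (h x (List.mem_cons_self))) (fun r hr => h r (List.mem_cons_of_mem _ hr))

theorem pv_colStats_getD (a : List (List Int)) (ha : a ≠ []) (k : Nat)
    (hall : ∀ r' ∈ a, k < r'.length) :
    PySem.List.pyGetD (pvColStats a) (k : Int) (0, 0, PySem.Dict.empty) =
      ((PySem.List.min? (a.map fun r => r.getD k 0) (fun x => x)).getD 0,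
       (PySem.List.max? (a.map fun r => r.getD k 0) (fun x => x)).getD 0,
       pvCounter (a.map fun r => r.getD k 0)) := by
  rw [PySem.List.pyGetD_natCast]
  obtain ⟨r0, rest, rfl⟩ : ∃ r0 rest, a = r0 :: rest := by
    cases a with
    | nil => exact absurd rfl ha
    | cons x t => exact ⟨x, t, rfl⟩
  have hkw : k < rest.foldl (fun m r => min m r.length) r0.length :=
    pv_lt_foldl_min k rest r0.length (hall r0 List.mem_cons_self)
      (fun r hr => hall r (List.mem_cons_of_mem _ hr))
  have hz : pvZipCols (r0 :: rest)
      = (List.range ((r0 :: rest).foldl (fun m r => min m r.length) r0.length)).map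
          (fun j => (r0 :: rest).map (fun r => r.getD j 0)) := by
    simp only [pvZipCols]
  unfold pvColStats
  rw [hz]
  simp [List.getD_eq_getElem?_getD, hkw]

theorem pv_elem_eq (a : List (List Int)) (hpre : Pre_countSpecialElements a)
    (r : List Int) (hr : r ∈ a) (k : Nat) (hk : k < r.length) (e : Int)
    (he : e = r.getD k 0) :
    pvElemA a r (k : Int) e =
      pvElemB (pvColStats a) ((PySem.List.min? r (fun x => x)).getD 0)
        ((PySem.List.max? r (fun x => x)).getD 0) (pvCounter r) (k : Int) e := by
  have ha : a ≠ [] := by rintro rfl; cases hr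
  have hrne : r ≠ [] := by rintro rfl; simp at hk
  have hgetD : ∀ xs : List Int, (pvCounter xs).getD e 0 = ((PySem.List.count xs e : Nat) : Int) := by
    intro xs
    unfold pvCounter
    rw [PySem.Dict.foldl_insert_getD_add_one_eq_counter, PySem.Dict.getD_counter, PySem.List.count_eq]
  have hemem : e ∈ r := by
    rw [he, List.getD_eq_getElem r 0 hk]
    exact List.getElem_mem hk
  unfold pvElemA pvElemB
  by_cases hspec : e = (PySem.List.min? r (fun x => x)).getD 0 ∨ e = (PySem.List.max? r (fun x => x)).getD 0
  · rw [if_pos hspec, if_pos hspec]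
    simp only [hgetD, Nat.one_lt_cast]
  · rw [if_neg hspec, if_neg hspec]
    push Not at hspec
    obtain ⟨m, hmin⟩ : ∃ m, PySem.List.min? r (fun x => x) = some m := by
      cases hmv : PySem.List.min? r (fun x => x) with
      | none => exact absurd ((PySem.List.min?_eq_none_iff r _).mp hmv) hrne
      | some m => exact ⟨m, rfl⟩
    obtain ⟨M, hmax⟩ : ∃ M, PySem.List.max? r (fun x => x) = some M := by
      cases hmv : PySem.List.max? r (fun x => x) with
      | none => exact absurd ((PySem.List.max?_eq_none_iff r _).mp hmv) hrne
      | some M => exact ⟨M, rfl⟩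
    have hm1 : m < e := by
      have h1 := PySem.List.min?_isMin hmin e hemem
      have h2 : e ≠ m := by simpa [hmin] using hspec.1
      omega
    have hM1 : e < M := by
      have h1 := PySem.List.max?_isMax hmax e hemem
      have h2 : e ≠ M := by simpa [hmax] using hspec.2
      omega
    have hall : ∀ r' ∈ a, k < r'.length := by
      refine hpre r hr k hk ⟨⟨m, PySem.List.min?_mem hmin, ?_⟩, ⟨M, PySem.List.max?_mem hmax, ?_⟩⟩
      · rwa [← he]
      · rwa [← he]
    rw [pv_colA_eq_map, pv_colStats_getD a ha k hall]
    simp only [hgetD, Nat.one_lt_cast, PySem.List.count_eq]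
    split_ifs <;> rfl

theorem pv_main (a : List (List Int)) (h : Pre_countSpecialElements a) :
    countSpecialElements a = countSpecialElements_alt a := by
  unfold countSpecialElements countSpecialElements_alt
  congr 1
  refine PySem.List.foldl_congr_mem' a _ _ _ (fun r hr acc => ?_)
  by_cases hnil : r = []
  · subst hnil
    simp [PySem.List.enumerate]
  · rw [if_neg hnil]
    refine PySem.List.foldl_congr_mem' _ _ _ _ (fun je hje acc2 => ?_)
    obtain ⟨k, hk, rfl⟩ := (PySem.List.mem_enumerate_iff r 0 je).mp hje
    have hz : ((0 : Int) + (k : Int)) = (k : Int) := by omega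
    have he : r[k] = r.getD k 0 := (List.getD_eq_getElem r 0 hk).symm
    rw [hz, pv_elem_eq a h r hr k hk r[k] he]

-- ===== VERDICT (by name: the statement is the Claim_ definition above) =====
theorem countSpecialElements_spec : Claim_equal_countSpecialElements := by
  intro a _ hpre
  exact pv_main a hpre
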